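-- pv_equiv track=rewrite | github.com/tizee/dotfiles | llms/quota.py | _select_organization
-- ===== SOURCE A (Python) =====
-- def _select_organization(orgs: list) -> dict:
--     """Select the appropriate organization"""
--     if not orgs:
--         raise Exception("No organizations found")
--
--     for org in orgs:
--         caps = [c.lower() for c in org.get("capabilities", [])]
--         if "chat" in caps:
--             return org
--
--     for org in orgs:
--         caps = [c.lower() for c in org.get("capabilities", [])]
--         if caps != ["api"]:
--             return org
--
--     return orgs[0]
-- ===== SOURCE B (Python) =====
-- def _select_organization(orgs: list) -> dict:
--     """Select the appropriate organization (single pass with two accumulators)."""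
--     if not orgs:
--         raise Exception("No organizations found")
--
--     first_chat = None
--     first_non_api = None
--     for org in orgs:
--         caps = [c.lower() for c in org.get("capabilities", [])]
--         if first_chat is None and "chat" in caps:
--             first_chat = org
--         if first_non_api is None and caps != ["api"]:
--             first_non_api = org
--
--     if first_chat is not None:
--         return first_chat
--     if first_non_api is not None:
--         return first_non_api
--     return orgs[0]
-- ===== Notes on version B (the rewrite author's own statement) =====
-- stated objective: alternative
-- what changed: Replaced A's two sequential early-return scans over orgs by a single pass that records the first chat-capable org and the first non-api-only org in two accumulators and decides after the loop.
import Mathlib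
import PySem

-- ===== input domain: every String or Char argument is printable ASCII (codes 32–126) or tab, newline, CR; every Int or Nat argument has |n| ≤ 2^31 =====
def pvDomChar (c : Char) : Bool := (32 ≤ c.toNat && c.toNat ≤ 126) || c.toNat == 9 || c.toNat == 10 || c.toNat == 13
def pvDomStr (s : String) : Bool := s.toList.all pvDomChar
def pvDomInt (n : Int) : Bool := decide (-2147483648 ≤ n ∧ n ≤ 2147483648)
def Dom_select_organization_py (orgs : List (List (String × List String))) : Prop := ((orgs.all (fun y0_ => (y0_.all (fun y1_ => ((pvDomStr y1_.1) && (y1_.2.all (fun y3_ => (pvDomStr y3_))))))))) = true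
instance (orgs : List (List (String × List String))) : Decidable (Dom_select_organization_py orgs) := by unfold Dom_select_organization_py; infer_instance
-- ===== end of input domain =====

-- B replaces A's two sequential early-return scans by a single pass maintaining two
-- accumulators (first chat-capable org, first non-api-only org), deciding after the loop.

-- shared helper: caps = [c.lower() for c in org.get("capabilities", [])]
def pvCaps (org : List (String × List String)) : List String :=
  ((PySem.Dict.mk org).getD "capabilities" []).map PySem.Str.lower

-- ===== PORT A =====
-- first loop: return the first org with "chat" in caps
def pvFindChat : List (List (String × List String)) → Option (List (String × List String))
  | [] => none
  | org :: rest => if "chat" ∈ pvCaps org then some org else pvFindChat rest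

-- second loop: return the first org with caps != ["api"]
def pvFindNonApi : List (List (String × List String)) → Option (List (String × List String))
  | [] => none
  | org :: rest => if pvCaps org ≠ ["api"] then some org else pvFindNonApi rest

def select_organization_py (orgs : List (List (String × List String))) : List (String × List String) :=
  match pvFindChat orgs with
  | some org => org
  | none =>
    match pvFindNonApi orgs with
    | some org => org
    | none => orgs.headD []   -- orgs[0]; only reached with orgs ≠ [] under Pre_

-- ===== PORT B =====
def pvStep (st : Option (List (String × List String)) × Option (List (String × List String)))
    (org : List (String × List String)) :
    Option (List (String × List String)) × Option (List (String × List String)) :=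
  let caps := pvCaps org
  (if st.1 = none ∧ "chat" ∈ caps then some org else st.1,
   if st.2 = none ∧ caps ≠ ["api"] then some org else st.2)

def select_organization_py_alt (orgs : List (List (String × List String))) : List (String × List String) :=
  let acc := orgs.foldl pvStep (none, none)
  match acc.1 with
  | some org => org
  | none =>
    match acc.2 with
    | some org => org
    | none => orgs.headD []

-- ===== PRECONDITION & SPEC =====
-- Pre_ excludes only the empty list, on which the Python A raises Exception (B raises the same).
def Pre_select_organization_py (orgs : List (List (String × List String))) : Prop := orgs ≠ []
instance (orgs : List (List (String × List String))) : Decidable (Pre_select_organization_py orgs) := by unfold Pre_select_organization_py; infer_instance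

def pvWitness_select_organization_py : (List (List (String × List String))) :=
  [[("capabilities", ["chat", "api"])], [("capabilities", ["api"])]]

def Spec_select_organization_py (orgs : List (List (String × List String))) (out : List (String × List String)) : Prop := out = select_organization_py_alt orgs
instance (orgs : List (List (String × List String))) (out : List (String × List String)) : Decidable (Spec_select_organization_py orgs out) := by unfold Spec_select_organization_py; infer_instance

-- ===== CLAIM (what is proved, stated in full; the proofs are below) =====
def Claim_equal_select_organization_py : Prop := ∀ (orgs : List (List (String × List String))), Dom_select_organization_py orgs → Pre_select_organization_py orgs → Spec_select_organization_py orgs (select_organization_py orgs)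

-- ===== LEMMAS AND PROOFS =====

-- the fold's two accumulators are exactly A's two scans, started behind any already-set values
theorem pvFoldl_step (orgs : List (List (String × List String)))
    (fc fna : Option (List (String × List String))) :
    orgs.foldl pvStep (fc, fna)
      = ((fc.orElse fun _ => pvFindChat orgs), (fna.orElse fun _ => pvFindNonApi orgs)) := by
  induction orgs generalizing fc fna with
  | nil => cases fc <;> cases fna <;> simp [Option.orElse, pvFindChat, pvFindNonApi]
  | cons org rest ih =>
    simp only [List.foldl_cons, pvStep, pvFindChat, pvFindNonApi]
    cases fc <;> cases fna <;>
      simp only [ih, Option.orElse] <;> split_ifs <;> simp_all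

-- ===== VERDICT (by name: the statement is the Claim_ definition above) =====
theorem select_organization_py_spec : Claim_equal_select_organization_py := by
  intro orgs _ _
  unfold Spec_select_organization_py select_organization_py select_organization_py_alt
  rw [pvFoldl_step]
  simp [Option.orElse]
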